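-- pv_equiv track=rewrite | github.com/Tamil182006/CareerIn_new | frontend/11careerin/app/parser/parser.py | detect_section_positions
-- ===== SOURCE A (Python) =====
-- SECTION_MAP = {
--     "profile": ["profile", "summary", "about", "objective"],
--     "education": ["education", "academic", "academics"],
--     "experience": ["experience", "work experience", "professional experience", "internship", "employment"],
--     "projects": ["projects", "personal projects", "academic projects"],
--     "skills": ["skills", "technical skills", "technologies"],
--     "certifications": ["certifications", "certificates", "licenses"],
--     "publications": ["publication", "publications", "research", "papers"],
--     "languages": ["languages"],
--     "interests": ["interests", "hobbies"],
--     "achievements": ["achievements", "awards", "honors"],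
--     "volunteering": ["volunteering", "community", "service"]
-- }
--
-- def detect_section_positions(lines):
--     positions = []
--
--     for idx, line in enumerate(lines):
--         clean = line.lower().strip()
--
--         for section, keywords in SECTION_MAP.items():
--             if clean in keywords or any(clean.startswith(k + ":") for k in keywords):
--                 positions.append((idx, section))
--                 break
--
--     return positions
-- ===== SOURCE B (Python) =====
-- SECTION_MAP = {
--     "profile": ["profile", "summary", "about", "objective"],
--     "education": ["education", "academic", "academics"],
--     "experience": ["experience", "work experience", "professional experience", "internship", "employment"],
--     "projects": ["projects", "personal projects", "academic projects"],
--     "skills": ["skills", "technical skills", "technologies"],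
--     "certifications": ["certifications", "certificates", "licenses"],
--     "publications": ["publication", "publications", "research", "papers"],
--     "languages": ["languages"],
--     "interests": ["interests", "hobbies"],
--     "achievements": ["achievements", "awards", "honors"],
--     "volunteering": ["volunteering", "community", "service"]
-- }
--
-- # Every keyword belongs to exactly one section, so a single flat index
-- # replaces the nested section/keyword scan.
-- KEYWORD_TO_SECTION = {k: s for s, kws in SECTION_MAP.items() for k in kws}
--
-- def detect_section_positions(lines):
--     positions = []
--     for idx, line in enumerate(lines):
--         clean = line.lower().strip()
--         i = clean.find(':')
--         key = clean if i == -1 else clean[:i]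
--         sec = KEYWORD_TO_SECTION.get(key)
--         if sec is not None:
--             positions.append((idx, sec))
--     return positions
-- ===== Notes on version B (the rewrite author's own statement) =====
-- stated objective: faster
-- what changed: B precomputes a flat keyword-to-section dict once and does a single hash lookup of the part of each cleaned line before its first colon, replacing A's per-line nested scan over all 11 sections and 31 keywords with their per-keyword string concatenations.
import Mathlib
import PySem

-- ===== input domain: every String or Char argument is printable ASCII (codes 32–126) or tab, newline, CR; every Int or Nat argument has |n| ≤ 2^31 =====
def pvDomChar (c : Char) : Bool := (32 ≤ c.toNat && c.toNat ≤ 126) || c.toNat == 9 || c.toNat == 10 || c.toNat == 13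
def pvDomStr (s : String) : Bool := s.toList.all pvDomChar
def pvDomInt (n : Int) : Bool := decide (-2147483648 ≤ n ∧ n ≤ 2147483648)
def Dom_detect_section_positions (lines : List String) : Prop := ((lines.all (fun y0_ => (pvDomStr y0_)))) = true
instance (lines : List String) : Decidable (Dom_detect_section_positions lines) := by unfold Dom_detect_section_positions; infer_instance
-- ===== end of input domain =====

-- B replaces A's nested section/keyword scan per line by one flat keyword→section
-- dict and a single lookup of the (before-first-colon) key; return values are equal.

-- ===== PORT A =====
def pvSECTION_MAP : List (String × List String) := [
  ("profile", ["profile", "summary", "about", "objective"]),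
  ("education", ["education", "academic", "academics"]),
  ("experience", ["experience", "work experience", "professional experience", "internship", "employment"]),
  ("projects", ["projects", "personal projects", "academic projects"]),
  ("skills", ["skills", "technical skills", "technologies"]),
  ("certifications", ["certifications", "certificates", "licenses"]),
  ("publications", ["publication", "publications", "research", "papers"]),
  ("languages", ["languages"]),
  ("interests", ["interests", "hobbies"]),
  ("achievements", ["achievements", "awards", "honors"]),
  ("volunteering", ["volunteering", "community", "service"])]

-- A: for each line, scan the sections in order; first section whose keyword list
-- matches exactly or as a "k:" prefix is appended (the 'break').
def detect_section_positions (lines : List String) : List (Int × String) :=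
  (PySem.List.enumerate lines).foldl (fun positions il =>
    let clean := PySem.Str.strip (PySem.Str.lower il.2)
    match pvSECTION_MAP.find? (fun sk =>
        decide (clean ∈ sk.2) || sk.2.any (fun k => PySem.Str.startswith clean (k ++ ":"))) with
    | some sk => positions ++ [(il.1, sk.1)]
    | none => positions) []

-- ===== PORT B =====
-- KEYWORD_TO_SECTION = {k: s for s, kws in SECTION_MAP.items() for k in kws}
def pvKEYWORD_TO_SECTION : PySem.Dict String String :=
  pvSECTION_MAP.foldl (fun d sk => sk.2.foldl (fun d k => d.insert k sk.1) d) PySem.Dict.empty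

-- B: one lookup of the part of `clean` before its first ':' (or all of it).
def detect_section_positions_alt (lines : List String) : List (Int × String) :=
  (PySem.List.enumerate lines).foldl (fun positions il =>
    let clean := PySem.Str.strip (PySem.Str.lower il.2)
    let i := PySem.Str.find clean ":"
    let key := if i == -1 then clean else PySem.Str.slice clean none (some i)
    match pvKEYWORD_TO_SECTION.get? key with
    | some s => positions ++ [(il.1, s)]
    | none => positions) []

-- ===== PRECONDITION & SPEC =====
def Spec_detect_section_positions (lines : List String) (out : List (Int × String)) : Prop := out = detect_section_positions_alt lines
instance (lines : List String) (out : List (Int × String)) : Decidable (Spec_detect_section_positions lines out) := by unfold Spec_detect_section_positions; infer_instance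

-- ===== CLAIM (what is proved, stated in full; the proofs are below) =====
def Claim_equal_detect_section_positions : Prop := ∀ (lines : List String), Dom_detect_section_positions lines → Spec_detect_section_positions lines (detect_section_positions lines)

-- ===== LEMMAS AND PROOFS =====

lemma pv_find?_congr {α : Type} (l : List α) (p q : α → Bool)
    (h : ∀ x ∈ l, p x = q x) : l.find? p = l.find? q := by
  induction l with
  | nil => rfl
  | cons a t ih =>
    simp only [List.find?_cons, h a (by simp)]
    cases q a
    · exact ih (fun x hx => h x (by simp [hx]))
    · rfl

-- first match in the flattened keyword→section list = first section containing the key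
lemma pv_get?_block (kws : List String) (s key : String) (rest : List (String × String)) :
    (PySem.Dict.mk (kws.map (fun k => (k, s)) ++ rest)).get? key
      = if key ∈ kws then some s else (PySem.Dict.mk rest).get? key := by
  induction kws with
  | nil => simp
  | cons k t ih =>
    simp only [List.map_cons, List.cons_append, PySem.Dict.get?_mk_cons, ih, List.mem_cons]
    by_cases hk : key = k
    · simp [hk]
    · simp [hk, Ne.symm hk]

lemma pv_get?_flat (sections : List (String × List String)) (key : String) :
    (PySem.Dict.mk (sections.flatMap (fun sk => sk.2.map (fun k => (k, sk.1))))).get? key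
      = (sections.find? (fun sk => decide (key ∈ sk.2))).map Prod.fst := by
  induction sections with
  | nil => rfl
  | cons sk rest ih =>
    simp only [List.flatMap_cons, List.find?_cons]
    rw [pv_get?_block]
    by_cases hm : key ∈ sk.2
    · simp [hm]
    · simp [hm, ih]

set_option maxRecDepth 4096 in
lemma pv_K2S_eq :
    pvKEYWORD_TO_SECTION
      = PySem.Dict.mk (pvSECTION_MAP.flatMap (fun sk => sk.2.map (fun k => (k, sk.1)))) := by
  rfl

lemma pv_keys_colon_free : ∀ sk ∈ pvSECTION_MAP, ∀ k ∈ sk.2, ':' ∉ k.toList := by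
  decide

-- if clean has no ':' then no "k:" prefix can match
lemma pv_no_colon (cs kl : List Char) (hf : PySem.Chars.find cs [':'] = -1) :
    ¬ ((kl ++ [':']) <+: cs) := by
  rintro ⟨t, ht⟩
  have hinf : [':'] <:+: cs := ⟨kl, t, by simpa [List.append_assoc] using ht⟩
  exact (PySem.Chars.find_eq_neg_one_iff cs [':']).mp hf hinf

lemma pv_colon_mem (cs : List Char) (hf : 0 ≤ PySem.Chars.find cs [':']) : ':' ∈ cs := by
  have h := (PySem.Chars.find_spec hf).1
  have : ':' ∈ cs.drop (PySem.Chars.find cs [':']).toNat := h.subset (List.mem_singleton_self ':')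
  exact List.mem_of_mem_drop this

-- "clean startswith k + ':'" ⇔ "the part of clean before its first ':' is k"
lemma pv_prefix_iff (cs kl : List Char) (hk : ':' ∉ kl)
    (hf : 0 ≤ PySem.Chars.find cs [':']) :
    ((kl ++ [':']) <+: cs) ↔ cs.take (PySem.Chars.find cs [':']).toNat = kl := by
  obtain ⟨hpre, hmin⟩ := PySem.Chars.find_spec hf
  set i := (PySem.Chars.find cs [':']).toNat with hi
  constructor
  · rintro ⟨t, ht⟩
    have hcs : cs = kl ++ ':' :: t := by
      rw [← ht]; simp
    -- colon positions before kl.length are impossible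
    have hno : ∀ j < kl.length, ¬ [':'] <+: cs.drop j := by
      intro j hj hp
      have : cs.drop j = kl.drop j ++ ':' :: t := by
        rw [hcs, List.drop_append_of_le_length (by omega)]
      rw [this] at hp
      obtain ⟨u, hu⟩ := hp
      have hne : kl.drop j ≠ [] := by simp [hj]
      obtain ⟨c, cl, hcl⟩ := List.exists_cons_of_ne_nil hne
      have hc : c = ':' := by
        have := hu
        rw [hcl] at this
        simpa using congrArg (fun l => l.head?) this.symm
      have : c ∈ kl := by
        have : c ∈ kl.drop j := by simp [hcl]
        exact List.mem_of_mem_drop this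
      rw [hc] at this; exact hk this
    have hcol : [':'] <+: cs.drop kl.length := by
      rw [hcs, List.drop_append_of_le_length le_rfl]
      simp
    have hile : i ≤ kl.length := by
      by_contra hlt
      exact (hmin kl.length (by omega)) hcol
    have hige : kl.length ≤ i := by
      by_contra hlt
      exact hno i (by omega) hpre
    have : i = kl.length := le_antisymm hile hige
    rw [this, hcs, List.take_append_of_le_length le_rfl, List.take_length]
  · intro ht
    obtain ⟨u, hu⟩ := hpre
    refine ⟨u, ?_⟩
    calc (kl ++ [':']) ++ u = kl ++ (':' :: u) := List.append_assoc kl [':'] u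
    _ = cs.take i ++ cs.drop i := by rw [ht, ← hu]; exact rfl
    _ = cs := List.take_append_drop i cs

-- homogeneous per-line step equality: A's first-matching-section = B's dict lookup
lemma pv_step (clean : String) :
    (pvSECTION_MAP.find? (fun sk =>
        decide (clean ∈ sk.2) || sk.2.any (fun k => PySem.Str.startswith clean (k ++ ":")))).map Prod.fst
      = pvKEYWORD_TO_SECTION.get?
          (if PySem.Str.find clean ":" == -1 then clean
           else PySem.Str.slice clean none (some (PySem.Str.find clean ":"))) := by
  have hcolL : (":" : String).toList = [':'] := rfl
  rw [pv_K2S_eq, pv_get?_flat]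
  congr 1
  apply pv_find?_congr
  intro sk hsk
  by_cases hneg : PySem.Str.find clean ":" = -1
  · -- no colon in clean: the prefix tests are all false, the key is clean itself
    have hnegC : PySem.Chars.find clean.toList [':'] = -1 := by
      rw [← hcolL, ← PySem.Str.find_eq]; exact hneg
    have hany : sk.2.any (fun k => PySem.Str.startswith clean (k ++ ":")) = false := by
      rw [List.any_eq_false]
      intro k _
      simp only [PySem.Str.startswith_eq, String.toList_append, hcolL, Bool.not_eq_true]
      rw [← Bool.not_eq_true, PySem.Chars.startswith_iff]
      exact pv_no_colon clean.toList k.toList hnegC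
    rw [hany, Bool.or_false, hneg]
    simp
  · -- clean has a colon: exact matches are impossible, prefix test = key lookup
    have hfC : 0 ≤ PySem.Chars.find clean.toList [':'] := by
      have h1 := PySem.Chars.neg_one_le_find clean.toList [':']
      have h2 : PySem.Chars.find clean.toList [':'] ≠ -1 := by
        intro h; exact hneg (by rw [PySem.Str.find_eq, hcolL]; exact h)
      omega
    have hkey : (PySem.Str.slice clean none (some (PySem.Str.find clean ":"))).toList
        = clean.toList.take (PySem.Chars.find clean.toList [':']).toNat := by
      rw [PySem.Str.toList_slice, PySem.Chars.slice_eq_listSlice]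
      conv_lhs => rw [PySem.Str.find_eq, hcolL, ← Int.toNat_of_nonneg hfC]
      rw [PySem.List.slice_to_natCast]
    have hmemF : decide (clean ∈ sk.2) = false := by
      simp only [decide_eq_false_iff_not]
      intro hmem
      exact pv_keys_colon_free sk hsk clean hmem (pv_colon_mem clean.toList hfC)
    have hany : sk.2.any (fun k => PySem.Str.startswith clean (k ++ ":"))
        = sk.2.any (fun k => PySem.Str.slice clean none (some (PySem.Str.find clean ":")) == k) := by
      apply PySem.List.any_congr_mem
      intro k hk
      simp only [PySem.Str.startswith_eq, String.toList_append, hcolL]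
      rw [Bool.eq_iff_iff, PySem.Chars.startswith_iff,
        pv_prefix_iff clean.toList k.toList (pv_keys_colon_free sk hsk k hk) hfC,
        beq_iff_eq, ← hkey]
      exact ⟨fun h => String.toList_inj.mp h, fun h => congrArg String.toList h⟩
    have hkeyif : (if (PySem.Str.find clean ":" == -1) = true then clean
        else PySem.Str.slice clean none (some (PySem.Str.find clean ":")))
        = PySem.Str.slice clean none (some (PySem.Str.find clean ":")) := by
      rw [if_neg (by simp only [beq_iff_eq]; exact hneg)]
    rw [hkeyif, hmemF, hany, Bool.false_or, List.any_beq, List.contains_eq_mem]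

-- ===== VERDICT (by name: the statement is the Claim_ definition above) =====
set_option maxRecDepth 4096 in
theorem detect_section_positions_spec : Claim_equal_detect_section_positions := by
  intro lines _
  unfold Spec_detect_section_positions detect_section_positions detect_section_positions_alt
  apply PySem.List.foldl_congr_mem
  intro acc il _
  dsimp only
  rw [← pv_step (PySem.Str.strip (PySem.Str.lower il.2))]
  cases List.find? (fun sk => decide (PySem.Str.strip (PySem.Str.lower il.2) ∈ sk.2)
      || sk.2.any fun k => PySem.Str.startswith (PySem.Str.strip (PySem.Str.lower il.2)) (k ++ ":"))
    pvSECTION_MAP <;> rfl
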